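-- pv_equiv track=rewrite | github.com/Naboni/Competitive-Programming | OA/oa10.py | solve
-- ===== SOURCE A (Python) =====
-- width = 15
--
-- userWidth = 5
--
-- def solve(message):
--     side, msg = message
--     result = []
--     words = msg.split()
--     row = [words[0]]
--     curr = len(words[0])
--     for idx, word in enumerate(words[1:]):
--         if curr + len(word) + 1 <= userWidth:
--             row.append(word)
--             curr += len(word) + 1
--         elif curr + len(word) + 1 > userWidth:
--             if side == 1:
--                 aft = " " * (width-curr+1)
--                 row.append(aft)
--             else:
--                 bef = " " * (width-curr+1)
--                 row = [bef] + row
--             x = " ".join(row)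
--             result.append("|"+x+"|")
--             curr = len(word)
--             row = [word]
--
--     if side == 1:
--         aft = " " * (width-curr+1)
--         row.append(aft)
--     else:
--         bef = " " * (width-curr+1)
--         row = [bef] + row
--     x = " ".join(row)
--     result.append("|"+x+"|")
--     return result
-- ===== SOURCE B (Python) =====
-- width = 15
--
-- userWidth = 5
--
-- def solve(message):
--     side, msg = message
--     # recursive decomposition: each call consumes one row's worth of words,
--     # accumulating the row as a single string and padding it with ljust/rjust
--     def rows(ws):
--         line = ws[0]
--         i = 1
--         while i < len(ws) and len(line) + 1 + len(ws[i]) <= userWidth: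
--             line = line + " " + ws[i]
--             i += 1
--         body = (line + " ").ljust(width + 2) if side == 1 else (" " + line).rjust(width + 2)
--         rest = ws[i:]
--         return ["|" + body + "|"] + (rows(rest) if rest else [])
--     return rows(msg.split())
-- ===== Notes on version B (the rewrite author's own statement) =====
-- stated objective: alternative
-- what changed: B replaces A's single fold over all words (mutable word-list row, running width counter, flushes interleaved into the same loop) by a recursion that emits one row per call: an inner while loop accumulates the row as a single string, the border padding is produced by str.ljust/str.rjust instead of joining an explicit padding element into the word list, and the recursion continues on the leftover word slice; Pre_ excludes whitespace-only messages, where both A and B raise IndexError on words[0].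
import Mathlib
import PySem

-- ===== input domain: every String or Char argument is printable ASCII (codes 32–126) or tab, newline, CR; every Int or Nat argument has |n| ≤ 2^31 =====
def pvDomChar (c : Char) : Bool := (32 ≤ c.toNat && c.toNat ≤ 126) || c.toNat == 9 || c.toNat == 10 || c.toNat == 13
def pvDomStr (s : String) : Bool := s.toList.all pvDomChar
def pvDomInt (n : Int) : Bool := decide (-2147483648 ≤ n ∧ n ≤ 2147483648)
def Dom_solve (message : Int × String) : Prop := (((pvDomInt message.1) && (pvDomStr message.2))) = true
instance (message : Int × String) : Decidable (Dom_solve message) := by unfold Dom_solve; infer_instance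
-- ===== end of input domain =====

-- B replaces A's single loop over all words (list row + running counter + interleaved flushes)
-- by a recursion that consumes one row per call, accumulating the row as one string and padding
-- it with an ljust/rjust-style pad-to-17; alternative decomposition, not faster.


-- ===== PORT A =====
-- " " * (width - curr + 1) with width = 15; Python's negative repeat gives "" (toNat clamps), exact.
def padA (curr : Int) : List Char := List.replicate (16 - curr).toNat ' '

-- A's loop step: state (result, row, curr); branches in A's order (the elif is the exact negation).
def stepA (side : Int) (st : List (List Char) × List (List Char) × Int) (word : List Char) :
    List (List Char) × List (List Char) × Int :=
  let result := st.1; let row := st.2.1; let curr := st.2.2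
  if curr + (word.length : Int) + 1 ≤ 5 then
    (result, row ++ [word], curr + (word.length : Int) + 1)
  else
    let row' := if side = 1 then row ++ [padA curr] else padA curr :: row
    let x := PySem.Chars.join [' '] row'
    (result ++ [['|'] ++ x ++ ['|']], [word], (word.length : Int))

-- A's final flush after the loop
def flushA (side : Int) (result : List (List Char)) (row : List (List Char)) (curr : Int) :
    List (List Char) :=
  let row' := if side = 1 then row ++ [padA curr] else padA curr :: row
  let x := PySem.Chars.join [' '] row'
  result ++ [['|'] ++ x ++ ['|']]

-- port of A; on words = [] Python raises IndexError (words[0]) — excluded by Pre_solve, [] returned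
def solve (message : Int × String) : List String :=
  let side := message.1
  let words := PySem.Chars.split₀ message.2.toList
  match words with
  | [] => []
  | w0 :: rest =>
    let st := rest.foldl (stepA side) ([], [w0], (w0.length : Int))
    (flushA side st.1 st.2.1 st.2.2).map String.ofList

-- ===== PORT B =====
-- the inner while loop: extend line with the next word while it fits, return (line, leftover ws[i:])
def takeLine (line : List Char) : List (List Char) → List Char × List (List Char)
  | [] => (line, [])
  | w :: t =>
    if (line.length : Int) + 1 + (w.length : Int) ≤ 5 then
      takeLine (line ++ [' '] ++ w) t
    else (line, w :: t)

-- leftover of the while loop never grows (used only for rowsB's termination)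
theorem takeLine_snd_le (line : List Char) (ws : List (List Char)) :
    (takeLine line ws).2.length ≤ ws.length := by
  induction ws generalizing line with
  | nil => simp [takeLine]
  | cons w t ih =>
    simp only [takeLine]
    split
    · exact le_trans (ih _) (by simp)
    · simp

-- (line + " ").ljust(17) / (" " + line).rjust(17): Nat subtraction clamps exactly like Python's pad
def fmtLine (side : Int) (line : List Char) : List Char :=
  let body :=
    if side = 1 then (line ++ [' ']) ++ List.replicate (17 - (line ++ [' ']).length) ' '
    else List.replicate (17 - ([' '] ++ line).length) ' ' ++ ([' '] ++ line)
  ['|'] ++ body ++ ['|']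

-- B's recursion: one bordered row per call, then recurse on the leftover words
def rowsB (side : Int) (ws : List (List Char)) : List (List Char) :=
  match ws with
  | [] => []
  | w0 :: rest =>
    let p := takeLine w0 rest
    fmtLine side p.1 :: rowsB side p.2
termination_by ws.length
decreasing_by
  exact Nat.lt_succ_of_le (takeLine_snd_le w0 rest)

-- port of B; same IndexError corner as A (ws[0] on empty words) — excluded by Pre_solve, [] returned
def solve_alt (message : Int × String) : List String :=
  (rowsB message.1 (PySem.Chars.split₀ message.2.toList)).map String.ofList

-- ===== PRECONDITION & SPEC =====
-- msg.split() must be nonempty: on whitespace-only messages both A and B raise IndexError (words[0]/ws[0]).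
def Pre_solve (message : Int × String) : Prop :=
  PySem.Chars.split₀ message.2.toList ≠ []
instance (message : Int × String) : Decidable (Pre_solve message) := by
  unfold Pre_solve; infer_instance

def pvWitness_solve : (Int × String) := (1, "hello world foo a b c d")

def Spec_solve (message : Int × String) (out : List String) : Prop := out = solve_alt message
instance (message : Int × String) (out : List String) : Decidable (Spec_solve message out) := by
  unfold Spec_solve; infer_instance

-- ===== CLAIM (what is proved, stated in full; the proofs are below) =====
def Claim_equal_solve : Prop :=
  ∀ (message : Int × String), Dom_solve message → Pre_solve message →
    Spec_solve message (solve message)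

-- ===== LEMMAS AND PROOFS =====

-- unfolding equations for the well-founded rowsB
theorem rowsB_nil (side : Int) : rowsB side [] = [] := by rw [rowsB]

theorem rowsB_cons (side : Int) (w0 : List Char) (rest : List (List Char)) :
    rowsB side (w0 :: rest)
      = fmtLine side (takeLine w0 rest).1 :: rowsB side (takeLine w0 rest).2 := by
  rw [rowsB]

-- " ".join(xs ++ [p]) appends " " ++ p when xs is nonempty
theorem join_append_last (sep p : List Char) (xs : List (List Char)) (h : xs ≠ []) :
    PySem.Chars.join sep (xs ++ [p]) = PySem.Chars.join sep xs ++ sep ++ p := by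
  induction xs with
  | nil => exact absurd rfl h
  | cons a t ih =>
    cases t with
    | nil => simp [PySem.Chars.join_singleton, PySem.Chars.join_cons_cons]
    | cons b u =>
      have ih' := ih (by simp)
      simp only [List.cons_append] at ih' ⊢
      rw [PySem.Chars.join_cons_cons, ih', PySem.Chars.join_cons_cons]
      simp [List.append_assoc]

-- " ".join(p :: xs) prepends p ++ " " when xs is nonempty
theorem join_cons_ne (sep p : List Char) (xs : List (List Char)) (h : xs ≠ []) :
    PySem.Chars.join sep (p :: xs) = p ++ sep ++ PySem.Chars.join sep xs := by
  cases xs with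
  | nil => exact absurd rfl h
  | cons b u => rw [PySem.Chars.join_cons_cons]

-- A's bordered row built from the padded word list equals B's pad-to-17 formatter
theorem flush_eq_fmt (side : Int) (row : List (List Char)) (h : row ≠ []) :
    ['|'] ++ PySem.Chars.join [' ']
        (if side = 1 then row ++ [padA ((PySem.Chars.join [' '] row).length : Int)]
         else padA ((PySem.Chars.join [' '] row).length : Int) :: row) ++ ['|']
      = fmtLine side (PySem.Chars.join [' '] row) := by
  have hpad : padA (((PySem.Chars.join [' '] row).length : Int))
      = List.replicate (16 - (PySem.Chars.join [' '] row).length) ' ' := by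
    unfold padA; congr 1; omega
  by_cases hs : side = 1
  · simp only [fmtLine, hs, reduceIte, join_append_last [' '] _ row h, hpad]
    have h17 : 17 - (PySem.Chars.join [' '] row ++ [' ']).length
        = 16 - (PySem.Chars.join [' '] row).length := by simp
    rw [h17]
  · simp only [fmtLine, hs, reduceIte, join_cons_ne [' '] _ row h, hpad]
    have h17 : 17 - ([' '] ++ PySem.Chars.join [' '] row).length
        = 16 - (PySem.Chars.join [' '] row).length := by simp
    rw [h17]
    simp [List.append_assoc]

theorem flushA_eq (side : Int) (result row : List (List Char)) (h : row ≠ []) :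
    flushA side result row ((PySem.Chars.join [' '] row).length : Int)
      = result ++ [fmtLine side (PySem.Chars.join [' '] row)] := by
  show result ++ [['|'] ++ PySem.Chars.join [' ']
      (if side = 1 then row ++ [padA ((PySem.Chars.join [' '] row).length : Int)]
       else padA ((PySem.Chars.join [' '] row).length : Int) :: row) ++ ['|']]
    = result ++ [fmtLine side (PySem.Chars.join [' '] row)]
  rw [flush_eq_fmt side row h]

-- main invariant: A's fold-then-flush starting from a row whose join is `line` equals
-- result ++ (B's takeLine-finished row, then B's recursion on the leftover words)
theorem fold_eq (side : Int) (rest : List (List Char)) :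
    ∀ (result : List (List Char)) (row : List (List Char)), row ≠ [] →
    (let st := rest.foldl (stepA side) (result, row, ((PySem.Chars.join [' '] row).length : Int))
     flushA side st.1 st.2.1 st.2.2)
      = result ++ (fmtLine side (takeLine (PySem.Chars.join [' '] row) rest).1
          :: rowsB side (takeLine (PySem.Chars.join [' '] row) rest).2) := by
  induction rest with
  | nil =>
    intro result row h
    simp only [List.foldl_nil, takeLine, rowsB_nil]
    exact flushA_eq side result row h
  | cons w t ih =>
    intro result row h
    by_cases hc : (((PySem.Chars.join [' '] row).length : Int)) + 1 + (w.length : Int) ≤ 5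
    · -- fits: A appends the word to the row, B extends the line
      have hstep : stepA side (result, row, (((PySem.Chars.join [' '] row).length : Int))) w
          = (result, row ++ [w],
             (((PySem.Chars.join [' '] row).length : Int)) + (w.length : Int) + 1) := by
        simp [stepA, show (((PySem.Chars.join [' '] row).length : Int)) + (w.length : Int) + 1 ≤ 5
          by omega]
      have hjoin : PySem.Chars.join [' '] (row ++ [w])
          = PySem.Chars.join [' '] row ++ [' '] ++ w := join_append_last [' '] w row h
      have hlen : (((PySem.Chars.join [' '] row).length : Int)) + (w.length : Int) + 1
          = ((PySem.Chars.join [' '] (row ++ [w])).length : Int) := by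
        rw [hjoin]; simp; omega
      have htake : takeLine (PySem.Chars.join [' '] row) (w :: t)
          = takeLine (PySem.Chars.join [' '] (row ++ [w])) t := by
        rw [hjoin]; simp [takeLine, hc]
      simp only [List.foldl_cons]
      rw [hstep, hlen, htake]
      exact ih result (row ++ [w]) (by simp)
    · -- does not fit: A flushes the row, B finishes the current line and recurses
      have hstep : stepA side (result, row, (((PySem.Chars.join [' '] row).length : Int))) w
          = (result ++ [fmtLine side (PySem.Chars.join [' '] row)], [w], ((w.length : Int))) := by
        simp only [stepA,
          if_neg (show ¬ (((PySem.Chars.join [' '] row).length : Int)) + (w.length : Int) + 1 ≤ 5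
            by omega)]
        rw [flush_eq_fmt side row h]
      have htake : takeLine (PySem.Chars.join [' '] row) (w :: t)
          = (PySem.Chars.join [' '] row, w :: t) := by
        simp [takeLine, hc]
      simp only [List.foldl_cons]
      rw [hstep, htake]
      have ih' := ih (result ++ [fmtLine side (PySem.Chars.join [' '] row)]) [w] (by simp)
      rw [PySem.Chars.join_singleton] at ih'
      simp only at ih' ⊢
      rw [ih', rowsB_cons]
      simp

-- ===== VERDICT (by name: the statement is the Claim_ definition above) =====
theorem solve_spec : Claim_equal_solve := by
  intro message _ hpre
  unfold Spec_solve solve solve_alt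
  cases hw : PySem.Chars.split₀ message.2.toList with
  | nil => exact absurd hw hpre
  | cons w0 rest =>
    dsimp only
    have hmain := fold_eq message.1 rest [] [w0] (by simp)
    rw [PySem.Chars.join_singleton] at hmain
    simp only [List.nil_append] at hmain
    rw [hmain, rowsB_cons]
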